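-- pv_equiv track=rewrite | github.com/NucleicAcidTest/ymca | problems/p006_minimum_cable_length/solution.py | minimum_cable_length
-- ===== SOURCE A (Python) =====
-- def minimum_cable_length(state, dist):
--     n = len(state)
--     on_indices = [i for i, value in enumerate(state) if value == 1]
--
--     first_on = on_indices[0]
--     last_on = on_indices[-1]
--     answer = 0
--
--     if first_on > 0:
--         answer += dist[first_on] - dist[0]
--
--     if last_on < n - 1:
--         answer += dist[-1] - dist[last_on]
--
--     for left, right in zip(on_indices, on_indices[1:]):
--         total_span = dist[right] - dist[left]
--         max_gap = 0
--
--         for i in range(left + 1, right + 1):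
--             gap = dist[i] - dist[i - 1]
--             if gap > max_gap:
--                 max_gap = gap
--
--         answer += total_span - max_gap
--
--     return answer
-- ===== SOURCE B (Python) =====
-- def minimum_cable_length(state, dist):
--     on = [i for i, v in enumerate(state) if v == 1]
--     first, last = on[0], on[-1]
--
--     # One pass: the wiring from dist[0] to dist[last] minus, for each stretch
--     # between consecutive on-lights, the largest (non-negative) gap inside it.
--     saved = 0
--     seg_max = 0
--     for i in range(first + 1, last + 1):
--         gap = dist[i] - dist[i - 1]
--         if gap > seg_max:
--             seg_max = gap
--         if state[i] == 1:
--             saved += seg_max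
--             seg_max = 0
--
--     answer = dist[last] - dist[0] - saved
--     if last < len(state) - 1:
--         answer += dist[-1] - dist[last]
--     return answer
-- ===== Notes on version B (the rewrite author's own statement) =====
-- stated objective: alternative
-- what changed: A loops over consecutive on-index pairs with an inner scan per pair and conditional end-segments; B telescopes the per-pair spans into dist[last]-dist[0] and replaces the nested loops by one fused pass over the index range that keeps a running segment maximum, flushing it at each on-light.
-- outside the precondition, e.g. on minimum_cable_length([1], []): A returns 0, B raises IndexError
import Mathlib
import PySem

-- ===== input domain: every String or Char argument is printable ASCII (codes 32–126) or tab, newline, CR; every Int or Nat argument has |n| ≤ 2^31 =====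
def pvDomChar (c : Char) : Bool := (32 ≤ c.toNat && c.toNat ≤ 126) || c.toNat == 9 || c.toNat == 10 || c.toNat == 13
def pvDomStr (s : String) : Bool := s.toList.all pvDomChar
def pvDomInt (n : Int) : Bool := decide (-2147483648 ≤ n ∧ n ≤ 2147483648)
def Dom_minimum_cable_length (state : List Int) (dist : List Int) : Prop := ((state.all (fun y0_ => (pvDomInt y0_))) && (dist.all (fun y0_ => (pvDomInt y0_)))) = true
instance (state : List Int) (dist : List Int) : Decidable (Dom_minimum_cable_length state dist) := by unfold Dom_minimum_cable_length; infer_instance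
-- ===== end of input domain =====

-- B replaces A's loop over consecutive on-index pairs (with an inner gap scan per pair)
-- by a telescoped total span and one fused pass keeping a running segment maximum (alternative decomposition, same cost).


-- ===== PORT A =====
def minimum_cable_length (state : List Int) (dist : List Int) : Int :=
  let n : Int := state.length
  let on_indices : List Int :=
    (PySem.List.enumerate state 0).foldl
      (fun acc p => if p.2 == 1 then acc ++ [p.1] else acc) []
  let first_on : Int := PySem.List.pyGetD on_indices 0 0
  let last_on : Int := PySem.List.pyGetD on_indices (-1) 0
  let answer : Int := 0
  let answer : Int := if first_on > 0 then
      answer + (PySem.List.pyGetD dist first_on 0 - PySem.List.pyGetD dist 0 0)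
    else answer
  let answer : Int := if last_on < n - 1 then
      answer + (PySem.List.pyGetD dist (-1) 0 - PySem.List.pyGetD dist last_on 0)
    else answer
  (on_indices.zip (PySem.List.slice on_indices (some 1) none)).foldl
    (fun answer lr =>
      let total_span := PySem.List.pyGetD dist lr.2 0 - PySem.List.pyGetD dist lr.1 0
      let max_gap := (PySem.List.pyRange (lr.1 + 1) (lr.2 + 1) 1).foldl
        (fun max_gap i =>
          let gap := PySem.List.pyGetD dist i 0 - PySem.List.pyGetD dist (i - 1) 0
          if gap > max_gap then gap else max_gap) 0
      answer + (total_span - max_gap)) answer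

-- ===== PORT B =====
def minimum_cable_length_alt (state : List Int) (dist : List Int) : Int :=
  let on : List Int :=
    (PySem.List.enumerate state 0).foldl
      (fun acc p => if p.2 == 1 then acc ++ [p.1] else acc) []
  let first : Int := PySem.List.pyGetD on 0 0
  let last : Int := PySem.List.pyGetD on (-1) 0
  let sm : Int × Int := (PySem.List.pyRange (first + 1) (last + 1) 1).foldl
    (fun sm i =>
      let gap := PySem.List.pyGetD dist i 0 - PySem.List.pyGetD dist (i - 1) 0
      let seg := if gap > sm.2 then gap else sm.2
      if PySem.List.pyGetD state i 0 == 1 then (sm.1 + seg, (0 : Int)) else (sm.1, seg)) (0, 0)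
  let answer : Int := PySem.List.pyGetD dist last 0 - PySem.List.pyGetD dist 0 0 - sm.1
  let answer : Int := if last < (state.length : Int) - 1 then
      answer + (PySem.List.pyGetD dist (-1) 0 - PySem.List.pyGetD dist last 0)
    else answer
  answer


-- ===== PRECONDITION & SPEC =====
-- Pre_ = the inputs on which Python A returns normally AND B returns: some light is on (else
-- A's on_indices[0] raises IndexError) and dist has an entry at every on index (else an access
-- dist[i] raises). The single excluded input family where A still returns is state = [1],
-- dist = []: A touches no dist entry there by accident of its guards, while B reads dist[0]
-- and raises IndexError.
def Pre_minimum_cable_length (state : List Int) (dist : List Int) : Prop :=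
  (1 : Int) ∈ state ∧
    ∀ i ∈ List.range state.length, state.getD i 0 = 1 → i < dist.length
instance (state : List Int) (dist : List Int) : Decidable (Pre_minimum_cable_length state dist) := by
  unfold Pre_minimum_cable_length; infer_instance

def pvWitness_minimum_cable_length : List Int × List Int := ([0, 1, 0, 1], [1, 3, 6, 10])

def Spec_minimum_cable_length (state : List Int) (dist : List Int) (out : Int) : Prop := out = minimum_cable_length_alt state dist
instance (state : List Int) (dist : List Int) (out : Int) : Decidable (Spec_minimum_cable_length state dist out) := by unfold Spec_minimum_cable_length; infer_instance

-- ===== CLAIM (what is proved, stated in full; the proofs are below) =====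
def Claim_equal_minimum_cable_length : Prop := ∀ (state : List Int) (dist : List Int), Dom_minimum_cable_length state dist → Pre_minimum_cable_length state dist → Spec_minimum_cable_length state dist (minimum_cable_length state dist)

-- ===== LEMMAS AND PROOFS =====

def pvOn (state : List Int) : List Int :=
  (PySem.List.enumerate state 0).foldl
    (fun acc p => if p.2 == 1 then acc ++ [p.1] else acc) []
def pvGapStep (dist : List Int) : Int → Int → Int := fun max_gap i =>
  let gap := PySem.List.pyGetD dist i 0 - PySem.List.pyGetD dist (i - 1) 0
  if gap > max_gap then gap else max_gap
def pvBStep (state dist : List Int) : Int × Int → Int → Int × Int := fun sm i =>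
  let gap := PySem.List.pyGetD dist i 0 - PySem.List.pyGetD dist (i - 1) 0
  let seg := if gap > sm.2 then gap else sm.2
  if PySem.List.pyGetD state i 0 == 1 then (sm.1 + seg, 0) else (sm.1, seg)
def pvM (dist : List Int) (l r : Int) : Int :=
  (PySem.List.pyRange (l + 1) (r + 1) 1).foldl (pvGapStep dist) 0
def pvPairStep (dist : List Int) : Int → Int × Int → Int := fun answer lr =>
  answer + ((PySem.List.pyGetD dist lr.2 0 - PySem.List.pyGetD dist lr.1 0) - pvM dist lr.1 lr.2)
def pvMaxSum (dist : List Int) : List Int → Int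
  | l :: r :: rest => pvM dist l r + pvMaxSum dist (r :: rest)
  | _ => 0
def pvSpanSum (dist : List Int) : List Int → Int
  | l :: r :: rest => (PySem.List.pyGetD dist r 0 - PySem.List.pyGetD dist l 0) + pvSpanSum dist (r :: rest)
  | _ => 0

lemma pvOn_eq_filter (state : List Int) :
    pvOn state = (PySem.List.pyRange 0 (state.length : Int) 1).filter
      (fun j => PySem.List.pyGetD state j 0 == 1) := by
  unfold pvOn
  rw [PySem.List.foldl_append_if, PySem.List.enumerate_eq_map_pyRange (d := 0)]
  simp [List.filter_map, Function.comp_def]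

lemma pvZipFold (dist : List Int) : ∀ (on : List Int) (a : Int),
    (on.zip (PySem.List.slice on (some 1) none)).foldl (pvPairStep dist) a
    = a + pvSpanSum dist on - pvMaxSum dist on
  | [], a => by simp [pvSpanSum, pvMaxSum]
  | [l], a => by simp [PySem.List.slice_from_one, pvSpanSum, pvMaxSum]
  | l :: r :: rest, a => by
    have ih := pvZipFold dist (r :: rest)
      (a + ((PySem.List.pyGetD dist r 0 - PySem.List.pyGetD dist l 0) - pvM dist l r))
    rw [PySem.List.slice_from_one, List.tail_cons] at ih ⊢
    rw [List.zip_cons_cons, List.foldl_cons]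
    exact (ih.trans (by simp only [pvSpanSum, pvMaxSum]; ring))

lemma pvSpanSum_telescope (dist : List Int) : ∀ (t : List Int) (l : Int),
    pvSpanSum dist (l :: t)
      = PySem.List.pyGetD dist (t.getLastD l) 0 - PySem.List.pyGetD dist l 0
  | [], l => by simp [pvSpanSum]
  | r :: rest, l => by
    simp only [pvSpanSum, List.getLastD_cons]
    rw [pvSpanSum_telescope dist rest r]
    ring

lemma pvChunkFold (state dist : List Int) : ∀ (L : List Int) (s m : Int),
    (∀ i ∈ L, (PySem.List.pyGetD state i 0 == 1) = false) →
    L.foldl (pvBStep state dist) (s, m) = (s, L.foldl (pvGapStep dist) m)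
  | [], s, m, _ => by simp
  | i :: L, s, m, h => by
    have hi := h i (by simp)
    simp only [List.foldl_cons, pvBStep, pvGapStep, hi]
    exact pvChunkFold state dist L s _ (fun j hj => h j (by simp [hj]))

lemma pvRange_decomp (a b r : Int) (L1 L2 : List Int)
    (h : PySem.List.pyRange a b 1 = L1 ++ r :: L2) :
    a ≤ r ∧ r < b ∧ L1 = PySem.List.pyRange a r 1 ∧ L2 = PySem.List.pyRange (r + 1) b 1 := by
  induction L1 generalizing a with
  | nil =>
    simp at h
    by_cases hab : b ≤ a
    · rw [PySem.List.pyRange_one_eq_nil hab] at h; exact absurd h (by simp)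
    · rw [PySem.List.pyRange_one_cons (by omega)] at h
      obtain ⟨rfl, rfl⟩ := List.cons.inj h
      exact ⟨le_refl _, by omega, (PySem.List.pyRange_one_eq_nil (le_refl _)).symm, rfl⟩
  | cons x L1' ih =>
    by_cases hab : b ≤ a
    · rw [PySem.List.pyRange_one_eq_nil hab] at h; exact absurd h (by simp)
    · rw [PySem.List.pyRange_one_cons (by omega)] at h
      simp only [List.cons_append] at h
      obtain ⟨rfl, h2⟩ := List.cons.inj h
      obtain ⟨h3, h4, h5, h6⟩ := ih _ h2
      refine ⟨by omega, h4, ?_, h6⟩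
      rw [PySem.List.pyRange_one_cons (by omega), h5]

lemma pvLe_getLastD (r : Int) (L : List Int) (h : ∀ x ∈ L, r ≤ x) : r ≤ L.getLastD r := by
  cases L with
  | nil => simp
  | cons x xs =>
    refine h _ ?_
    have := List.getLast_mem (List.cons_ne_nil x xs)
    simp only [List.getLastD_eq_getLast?, List.getLast?_eq_some_getLast (List.cons_ne_nil x xs),
      Option.getD_some]
    exact this

lemma pvMainLoop (state dist : List Int) (t : List Int) : ∀ (l s : Int),
    t = (PySem.List.pyRange (l + 1) (state.length : Int) 1).filter
        (fun j => PySem.List.pyGetD state j 0 == 1) →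
    (PySem.List.pyRange (l + 1) (t.getLastD l + 1) 1).foldl (pvBStep state dist) (s, 0)
    = (s + pvMaxSum dist (l :: t), 0) := by
  induction t with
  | nil =>
    intro l s _
    simp [PySem.List.pyRange_one_eq_nil (le_refl (l + 1)), pvMaxSum]
  | cons r rest ih =>
    intro l s h
    obtain ⟨L1, L2, hsplit, hL1, hr, hL2⟩ := List.filter_eq_cons_iff.mp h.symm
    obtain ⟨hlr, hrn, rfl, rfl⟩ := pvRange_decomp _ _ _ _ _ hsplit
    subst hL2
    have hrlast : r ≤ (List.filter (fun j => PySem.List.pyGetD state j 0 == 1)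
        (PySem.List.pyRange (r + 1) (state.length : Int) 1)).getLastD r :=
      pvLe_getLastD r _ (fun x hx => by
        have := PySem.List.mem_pyRange_one.mp (List.mem_of_mem_filter hx)
        omega)
    simp only [List.getLastD_cons]
    have hb1 : l + 1 ≤ r := hlr
    have hb2 : r ≤ (List.filter (fun j => PySem.List.pyGetD state j 0 == 1)
        (PySem.List.pyRange (r + 1) (state.length : Int) 1)).getLastD r + 1 := by omega
    have hsplit2 := PySem.List.pyRange_one_append (l + 1) r
      ((List.filter (fun j => PySem.List.pyGetD state j 0 == 1)
        (PySem.List.pyRange (r + 1) (state.length : Int) 1)).getLastD r + 1)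
      hb1 hb2
    have hcons := PySem.List.pyRange_one_cons (a := r)
      (b := (List.filter (fun j => PySem.List.pyGetD state j 0 == 1)
        (PySem.List.pyRange (r + 1) (state.length : Int) 1)).getLastD r + 1) (by omega)
    rw [hsplit2, List.foldl_append, hcons, List.foldl_cons]
    rw [pvChunkFold state dist _ s 0 (fun i hi => by simpa using hL1 i hi)]
    have hstep : pvBStep state dist (s, (PySem.List.pyRange (l + 1) r 1).foldl (pvGapStep dist) 0) r
        = (s + pvM dist l r, 0) := by
      simp only [pvBStep, hr, if_true, pvM,
        PySem.List.pyRange_one_succ_right (show l + 1 ≤ r by omega), List.foldl_append,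
        List.foldl_cons, List.foldl_nil]
      rfl
    rw [hstep, ih r (s + pvM dist l r) rfl]
    simp only [pvMaxSum]
    ring_nf

lemma pvA_eq (state dist : List Int) :
    minimum_cable_length state dist =
      ((pvOn state).zip (PySem.List.slice (pvOn state) (some 1) none)).foldl (pvPairStep dist)
        (let first_on := PySem.List.pyGetD (pvOn state) 0 0
         let last_on := PySem.List.pyGetD (pvOn state) (-1) 0
         let a1 : Int := if first_on > 0 then
             0 + (PySem.List.pyGetD dist first_on 0 - PySem.List.pyGetD dist 0 0) else 0
         if last_on < (state.length : Int) - 1 then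
           a1 + (PySem.List.pyGetD dist (-1) 0 - PySem.List.pyGetD dist last_on 0)
         else a1) := rfl

lemma pvB_eq (state dist : List Int) :
    minimum_cable_length_alt state dist =
      (let first := PySem.List.pyGetD (pvOn state) 0 0
       let last := PySem.List.pyGetD (pvOn state) (-1) 0
       let sm := (PySem.List.pyRange (first + 1) (last + 1) 1).foldl (pvBStep state dist) (0, 0)
       let answer := PySem.List.pyGetD dist last 0 - PySem.List.pyGetD dist 0 0 - sm.1
       if last < (state.length : Int) - 1 then
         answer + (PySem.List.pyGetD dist (-1) 0 - PySem.List.pyGetD dist last 0)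
       else answer) := rfl

lemma pvAB (state dist : List Int) :
    minimum_cable_length state dist = minimum_cable_length_alt state dist := by
  rw [pvA_eq, pvB_eq]
  cases hon : pvOn state with
  | nil =>
    simp only []
    have h0 : PySem.List.pyGetD ([] : List Int) 0 0 = 0 := rfl
    have h1 : PySem.List.pyGetD ([] : List Int) (-1) 0 = 0 := rfl
    simp only [h0, h1, List.zip_nil_left, List.foldl_nil,
      PySem.List.pyRange_one_eq_nil (le_refl (0 + 1))]
    norm_num
  | cons first t =>
    have hfil : first :: t = (PySem.List.pyRange 0 (state.length : Int) 1).filter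
        (fun j => PySem.List.pyGetD state j 0 == 1) := hon ▸ (pvOn_eq_filter state)
    obtain ⟨L1, L2, hsplit, hL1, hfirst1, hL2⟩ := List.filter_eq_cons_iff.mp hfil.symm
    obtain ⟨hf0, hfn, rfl, rfl⟩ := pvRange_decomp _ _ _ _ _ hsplit
    have hget0 : PySem.List.pyGetD (first :: t) 0 0 = first := PySem.List.pyGetD_zero_cons first t 0
    have hgetm1 : PySem.List.pyGetD (first :: t) (-1) 0 = t.getLastD first := by
      rw [PySem.List.pyGetD_neg_one (first :: t) 0 (List.cons_ne_nil first t)]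
      exact List.getLast_eq_getLastD _
    simp only [hget0, hgetm1]
    rw [pvZipFold, pvSpanSum_telescope, pvMainLoop state dist t first 0 hL2.symm]
    have ha1 : (if first > 0 then
        0 + (PySem.List.pyGetD dist first 0 - PySem.List.pyGetD dist 0 0) else 0)
        = PySem.List.pyGetD dist first 0 - PySem.List.pyGetD dist 0 0 := by
      split_ifs with h
      · ring
      · have : first = 0 := by omega
        rw [this]; ring
    rw [ha1]
    split_ifs <;> ring

-- ===== VERDICT (by name: the statement is the Claim_ definition above) =====
theorem minimum_cable_length_spec : Claim_equal_minimum_cable_length := by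
  intro state dist _ _
  unfold Spec_minimum_cable_length
  exact pvAB state dist
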